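-- pv_equiv track=rewrite | github.com/LogicalContradiction/advent_of_code | day08/src/solution.py | is_visible_col_test
-- ===== SOURCE A (Python) =====
-- def is_visible_col_test(data, col_index, tree_to_check_row_index):
-- 	"""Used to check if the tree at the given index is visible. If all the other trees between this one and the edges are shorter, the tree is visible.
--
-- 	Parameters:
-- 		data (list<str>): The grid of trees.
-- 		col_index (int): The column index of trees that is being checked.
-- 		tree_to_check_row_index (int): The row index of the tree we are checking to see if it's visible.
--
-- 	Returns:
-- 		bool: True if the tree is visible (all other trees in the column are shorter), or False if it is not."""
-- 	if tree_to_check_row_index == 0 or tree_to_check_row_index == len(data)-1: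
-- 		#the two trees on the outside edges of the column are always visible
-- 		return True
-- 	tree_to_check_height = data[tree_to_check_row_index][col_index]
-- 	visible = True
-- 	#check topside first
-- 	for index in range(tree_to_check_row_index):
-- 		curr_tree_height = data[index][col_index]
-- 		if curr_tree_height >= tree_to_check_height:
-- 			visible = False
-- 			break
-- 	if visible:
-- 		return True
-- 	visible = True
-- 	for index in range(tree_to_check_row_index+1, len(data), 1):
-- 		curr_tree_height = data[index][col_index]
-- 		if curr_tree_height >= tree_to_check_height:
-- 			visible = False
-- 			break
-- 	if visible:
-- 		return True
-- 	return False
-- ===== SOURCE B (Python) =====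
-- def is_visible_col_test(data, col_index, tree_to_check_row_index):
--     if tree_to_check_row_index == 0 or tree_to_check_row_index == len(data) - 1:
--         return True
--     height = data[tree_to_check_row_index][col_index]
--     blockers = [row_index for row_index, row in enumerate(data) if row[col_index] >= height]
--     # the tree itself is a blocker, so the list is non-empty; it is visible upward
--     # iff it is the first blocker, and visible downward iff it is the last one
--     return blockers[0] == tree_to_check_row_index or blockers[-1] == tree_to_check_row_index
-- ===== Notes on version B (the rewrite author's own statement) =====
-- stated objective: alternative
-- what changed: B makes one pass over the whole column collecting the indices of all blocking trees (height >= target) and decides visibility by whether the target row is the first or last blocker, instead of A's two directional break-flag loops.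
-- outside the precondition, e.g. on is_visible_col_test(['9', '1'], 0, -1): A returns True, B returns False; on is_visible_col_test(['99', '55', '99', '1'], 1, 1): A returns False, B raises IndexError
import Mathlib
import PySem

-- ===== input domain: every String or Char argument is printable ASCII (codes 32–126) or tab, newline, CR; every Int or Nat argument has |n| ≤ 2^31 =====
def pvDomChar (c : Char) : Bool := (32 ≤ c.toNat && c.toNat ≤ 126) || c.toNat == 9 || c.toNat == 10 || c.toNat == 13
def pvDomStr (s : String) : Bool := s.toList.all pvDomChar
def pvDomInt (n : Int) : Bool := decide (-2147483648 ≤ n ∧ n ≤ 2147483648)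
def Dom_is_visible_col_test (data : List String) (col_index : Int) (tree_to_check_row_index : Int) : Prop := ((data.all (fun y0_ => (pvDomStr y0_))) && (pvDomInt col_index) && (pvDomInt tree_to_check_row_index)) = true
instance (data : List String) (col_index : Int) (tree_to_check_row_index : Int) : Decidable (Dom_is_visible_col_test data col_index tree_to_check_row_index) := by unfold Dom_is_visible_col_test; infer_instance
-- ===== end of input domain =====

-- B collects the column's blocking indices (height ≥ target) in one pass and answers by whether the target row is the first or last blocker, replacing A's two break-flag loops (alternative decomposition; return value only).


-- ===== PORT A =====
-- the 'visible = True … break' loop of A: scan the given indices, flag off (False) at the first tree ≥ h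
def pvLoopA (data : List String) (col : Int) (h : Char) : List Int → Bool
  | [] => true
  | i :: rest =>
    match PySem.List.pyGet? data i with
    | none => false   -- IndexError in Python; excluded by Pre_
    | some r =>
      match PySem.Str.pyGet? r col with
      | none => false -- IndexError in Python; excluded by Pre_
      | some c => if h ≤ c then false else pvLoopA data col h rest

def is_visible_col_test (data : List String) (col_index : Int) (tree_to_check_row_index : Int) : Bool :=
  if tree_to_check_row_index = 0 ∨ tree_to_check_row_index = (data.length : Int) - 1 then true
  else
    match PySem.List.pyGet? data tree_to_check_row_index with
    | none => false   -- IndexError in Python; excluded by Pre_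
    | some trow =>
      match PySem.Str.pyGet? trow col_index with
      | none => false -- IndexError in Python; excluded by Pre_
      | some h =>
        if pvLoopA data col_index h (PySem.List.pyRange 0 tree_to_check_row_index 1) then true
        else if pvLoopA data col_index h (PySem.List.pyRange (tree_to_check_row_index + 1) (data.length : Int) 1) then true
        else false

-- ===== PORT B =====
-- B's comprehension over enumerate(data): the indices of all rows whose column char is ≥ h
def pvBlockers (col : Int) (h : Char) : List (Int × String) → List Int
  | [] => []
  | (j, r) :: rest =>
    match PySem.Str.pyGet? r col with
    | none => []      -- IndexError in Python; excluded by Pre_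
    | some c => if h ≤ c then j :: pvBlockers col h rest else pvBlockers col h rest

def is_visible_col_test_alt (data : List String) (col_index : Int) (tree_to_check_row_index : Int) : Bool :=
  if tree_to_check_row_index = 0 ∨ tree_to_check_row_index = (data.length : Int) - 1 then true
  else
    match PySem.List.pyGet? data tree_to_check_row_index with
    | none => false   -- IndexError in Python; excluded by Pre_
    | some trow =>
      match PySem.Str.pyGet? trow col_index with
      | none => false -- IndexError in Python; excluded by Pre_
      | some height =>
        let blockers := pvBlockers col_index height (PySem.List.enumerate data 0)
        match PySem.List.pyGet? blockers 0, PySem.List.pyGet? blockers (-1) with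
        | some f, some l => decide (f = tree_to_check_row_index) || decide (l = tree_to_check_row_index)
        | _, _ => false -- blockers empty: unreachable under Pre_ (the tree itself is a blocker)

-- ===== PRECONDITION & SPEC =====
-- Pre_ admits the two always-visible edge rows unconditionally, and otherwise requires the row index to be an
-- ordinary (non-negative, in-range) index and the column index to be a valid Python index for every row.
-- It excludes (a) ragged/out-of-range inputs where one of the programs raises IndexError, and (b) negative row
-- indices, where A's True (its top scan is the empty range) and B's first/last-blocker value are both accidents
-- of Python's negative-index wraparound that no one would specify.
def Pre_is_visible_col_test (data : List String) (col_index : Int) (tree_to_check_row_index : Int) : Prop :=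
  (tree_to_check_row_index = 0 ∨ tree_to_check_row_index = (data.length : Int) - 1) ∨
  (0 ≤ tree_to_check_row_index ∧ tree_to_check_row_index < (data.length : Int) ∧
    ∀ r ∈ data, PySem.Raise.InRange r.toList.length col_index)
instance (data : List String) (col_index : Int) (tree_to_check_row_index : Int) : Decidable (Pre_is_visible_col_test data col_index tree_to_check_row_index) := by unfold Pre_is_visible_col_test; infer_instance

def pvWitness_is_visible_col_test : List String × Int × Int := (["123", "456", "789"], 1, 1)

def Spec_is_visible_col_test (data : List String) (col_index : Int) (tree_to_check_row_index : Int) (out : Bool) : Prop := out = is_visible_col_test_alt data col_index tree_to_check_row_index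
instance (data : List String) (col_index : Int) (tree_to_check_row_index : Int) (out : Bool) : Decidable (Spec_is_visible_col_test data col_index tree_to_check_row_index out) := by unfold Spec_is_visible_col_test; infer_instance

-- ===== CLAIM (what is proved, stated in full; the proofs are below) =====
def Claim_equal_is_visible_col_test : Prop := ∀ (data : List String) (col_index : Int) (tree_to_check_row_index : Int), Dom_is_visible_col_test data col_index tree_to_check_row_index → Pre_is_visible_col_test data col_index tree_to_check_row_index → Spec_is_visible_col_test data col_index tree_to_check_row_index (is_visible_col_test data col_index tree_to_check_row_index)

-- ===== LEMMAS AND PROOFS =====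

-- A's break-flag scan over a list of in-range indices succeeds iff every scanned column entry is below h
lemma pvLoopA_iff (data : List String) (col : Int) (h : Char) (L : List Int)
    (hcol : ∀ r ∈ data, PySem.Raise.InRange r.toList.length col)
    (hv : ∀ i ∈ L, 0 ≤ i ∧ i < (data.length : Int)) :
    (pvLoopA data col h L = true ↔
      ∀ i ∈ L, ∀ (_ : i.toNat < data.length),
        ((PySem.Str.pyGet? data[i.toNat] col).getD ' ') < h) := by
  induction L with
  | nil => simp [pvLoopA]
  | cons i L ih =>
    obtain ⟨hi0, hilen⟩ := hv i (by simp)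
    have hlt : i.toNat < data.length := by omega
    have hget : PySem.List.pyGet? data i = some data[i.toNat] :=
      PySem.List.pyGet?_eq_some_getElem data hi0 hilen
    have hcIn := hcol _ (data.getElem_mem hlt)
    obtain ⟨c, hc⟩ : ∃ c, PySem.Str.pyGet? data[i.toNat] col = some c := by
      cases e : PySem.Str.pyGet? data[i.toNat] col with
      | some c => exact ⟨c, rfl⟩
      | none =>
        exfalso
        simp only [pysem] at e
        exact e hcIn
    simp only [pvLoopA, hget, hc]
    by_cases hhc : h ≤ c
    · simp only [if_pos hhc]
      constructor
      · intro hfalse; cases hfalse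
      · intro H
        have := H i (by simp) hlt
        rw [hc] at this
        simp at this
        exact absurd this (not_lt.mpr hhc)
    · simp only [if_neg hhc]
      rw [ih (fun j hj => hv j (by simp [hj]))]
      constructor
      · intro H j hj hjlt
        rcases List.mem_cons.mp hj with rfl | hj'
        · rw [hc]; simpa using not_le.mp hhc
        · exact H j hj' hjlt
      · intro H j hj hjlt
        exact H j (List.mem_cons_of_mem _ hj) hjlt

-- B's comprehension, characterised: the blocker indices are the filtered range, shifted by the start s
lemma pvBlockers_eq (col : Int) (h : Char) :
    ∀ (data : List String) (s : Int),
      (∀ r ∈ data, PySem.Raise.InRange r.toList.length col) →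
      pvBlockers col h (PySem.List.enumerate data s)
        = ((List.range data.length).filter
            (fun k => decide (h ≤ (PySem.Str.pyGet? (data.getD k "") col).getD ' '))).map
            (fun (k : Nat) => s + (k : Int)) := by
  intro data
  induction data with
  | nil => intro s _; simp [pvBlockers, PySem.List.enumerate]
  | cons r rest ih =>
    intro s hcol
    obtain ⟨c, hc⟩ : ∃ c, PySem.Str.pyGet? r col = some c := by
      cases e : PySem.Str.pyGet? r col with
      | some c => exact ⟨c, rfl⟩
      | none =>
        exfalso
        simp only [pysem] at e
        exact e (hcol r (by simp))
    have hrec := ih (s + 1) (fun x hx => hcol x (by simp [hx]))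
    rw [PySem.List.enumerate_cons]
    simp only [pvBlockers, hc]
    rw [List.length_cons, List.range_succ_eq_map, List.filter_cons]
    have hshift : ∀ (q : Nat → Bool),
        List.map (fun (k : Nat) => s + (k : Int)) (List.map Nat.succ ((List.range rest.length).filter q))
          = List.map (fun (k : Nat) => (s + 1) + (k : Int)) ((List.range rest.length).filter q) := by
      intro q
      rw [List.map_map]
      apply List.map_congr_left
      intro k _
      simp only [Function.comp, Nat.succ_eq_add_one]
      push_cast
      ring
    have hpred : ((fun k => decide (h ≤ (PySem.Str.pyGet? ((r :: rest).getD k "") col).getD ' ')) ∘ Nat.succ)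
        = (fun k => decide (h ≤ (PySem.Str.pyGet? (rest.getD k "") col).getD ' ')) := by
      funext k
      simp [Function.comp]
    by_cases hhc : h ≤ c
    · have hcond : decide (h ≤ (PySem.Str.pyGet? ((r :: rest).getD 0 "") col).getD ' ') = true := by
        rw [List.getD_cons_zero, hc]
        simpa using hhc
      rw [if_pos hcond, List.filter_map, hpred, List.map_cons, hshift, ← hrec]
      simp only [if_pos hhc]
      simp
    · have hcond : ¬ (decide (h ≤ (PySem.Str.pyGet? ((r :: rest).getD 0 "") col).getD ' ') = true) := by
        rw [List.getD_cons_zero, hc]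
        simpa using hhc
      rw [if_neg hcond, List.filter_map, hpred, hshift, ← hrec]
      simp only [if_neg hhc]

-- first element of a filtered range': the least index satisfying p
lemma pv_head_filter_range' (p : Nat → Bool) (i : Nat) :
    ∀ (n s : Nat), (((List.range' s n).filter p).head? = some i) ↔
      (s ≤ i ∧ i < s + n ∧ p i = true ∧ ∀ k, s ≤ k → k < i → p k = false) := by
  intro n
  induction n with
  | zero =>
    intro s
    constructor
    · intro hfalse; simp [List.range'] at hfalse
    · rintro ⟨h1, h2, -, -⟩; exact absurd h2 (by omega)
  | succ n ih =>
    intro s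
    rw [List.range'_succ, List.filter_cons]
    cases hp : p s with
    | true =>
      simp only [if_true, List.head?_cons, Option.some_inj]
      constructor
      · rintro rfl
        exact ⟨le_refl _, by omega, hp, fun k h1 h2 => by omega⟩
      · rintro ⟨h1, _, hpi, hall⟩
        by_contra hne
        have : s < i := by omega
        have := hall s (le_refl _) this
        rw [hp] at this; cases this
    | false =>
      rw [if_neg (by simp), ih (s + 1)]
      constructor
      · rintro ⟨h1, h2, hpi, hall⟩
        exact ⟨by omega, by omega, hpi, fun k hk1 hk2 => by
          rcases Nat.eq_or_lt_of_le hk1 with rfl | hk1'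
          · exact hp
          · exact hall k hk1' hk2⟩
      · rintro ⟨h1, h2, hpi, hall⟩
        have hne : i ≠ s := by
          rintro rfl; rw [hp] at hpi; cases hpi
        exact ⟨by omega, by omega, hpi, fun k hk1 hk2 => hall k (by omega) hk2⟩

-- last element of a filtered range': the greatest index satisfying p
lemma pv_last_filter_range' (p : Nat → Bool) (i : Nat) :
    ∀ (n s : Nat), (((List.range' s n).filter p).getLast? = some i) ↔
      (s ≤ i ∧ i < s + n ∧ p i = true ∧ ∀ k, i < k → k < s + n → p k = false) := by
  intro n
  induction n with
  | zero =>
    intro s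
    constructor
    · intro hfalse; simp [List.range'] at hfalse
    · rintro ⟨h1, h2, -, -⟩; exact absurd h2 (by omega)
  | succ n ih =>
    intro s
    rw [List.range'_succ, List.filter_cons]
    have hnone : ∀ x ∈ (List.range' (s + 1) n).filter p, s + 1 ≤ x ∧ x < s + 1 + n ∧ p x = true := by
      intro x hx
      rw [List.mem_filter, List.mem_range'_1] at hx
      exact ⟨hx.1.1, hx.1.2, hx.2⟩
    cases hp : p s with
    | true =>
      simp only [if_true]
      cases hF : (List.range' (s + 1) n).filter p with
      | nil =>
        have hallf : ∀ k, s + 1 ≤ k → k < s + 1 + n → p k = false := by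
          intro k hk1 hk2
          by_contra hne
          have hk : k ∈ (List.range' (s + 1) n).filter p := by
            rw [List.mem_filter, List.mem_range'_1]
            exact ⟨⟨hk1, hk2⟩, by simpa using hne⟩
          rw [hF] at hk; cases hk
        simp only [List.getLast?_singleton, Option.some_inj]
        constructor
        · rintro rfl
          exact ⟨le_refl _, by omega, hp, fun k hk1 hk2 => hallf k (by omega) (by omega)⟩
        · rintro ⟨h1, h2, hpi, _⟩
          by_contra hne
          have : s + 1 ≤ i := by omega
          have := hallf i this (by omega)
          rw [hpi] at this; cases this
      | cons x xs =>
        rw [List.getLast?_cons_cons, ← hF, ih (s + 1)]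
        have hxmem := hnone x (by rw [hF]; simp)
        constructor
        · rintro ⟨h1, h2, hpi, hall⟩
          exact ⟨by omega, by omega, hpi, fun k hk1 hk2 => hall k hk1 (by omega)⟩
        · rintro ⟨h1, h2, hpi, hall⟩
          have hne : s + 1 ≤ i := by
            by_contra hlt
            have hi : i = s := by omega
            subst hi
            have := hall x (by omega) (by omega)
            rw [hxmem.2.2] at this; cases this
          exact ⟨hne, by omega, hpi, fun k hk1 hk2 => hall k hk1 (by omega)⟩
    | false =>
      rw [if_neg (by simp), ih (s + 1)]
      constructor
      · rintro ⟨h1, h2, hpi, hall⟩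
        exact ⟨by omega, by omega, hpi, fun k hk1 hk2 => hall k hk1 (by omega)⟩
      · rintro ⟨h1, h2, hpi, hall⟩
        have hne : i ≠ s := by
          rintro rfl; rw [hp] at hpi; cases hpi
        exact ⟨by omega, by omega, hpi, fun k hk1 hk2 => hall k hk1 (by omega)⟩

theorem is_visible_col_test_spec : Claim_equal_is_visible_col_test := by
  intro data col row _ hpre
  unfold Spec_is_visible_col_test is_visible_col_test is_visible_col_test_alt
  by_cases hedge : row = 0 ∨ row = (data.length : Int) - 1
  · simp [hedge]
  · simp only [if_neg hedge]
    rcases hpre with hpre | ⟨hr0, hrlen, hcol⟩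
    · exact absurd hpre hedge
    set n : Nat := row.toNat with hn
    have hrow : row = (n : Int) := by omega
    have hn1 : 1 ≤ n := by
      rcases Nat.eq_zero_or_pos n with h0 | h1
      · exfalso; exact hedge (Or.inl (by omega))
      · exact h1
    have hnlen : n + 1 < data.length := by
      have : row < (data.length : Int) - 1 := by
        rcases lt_or_eq_of_le (by omega : row ≤ (data.length : Int) - 1) with h | h
        · exact h
        · exact absurd (Or.inr h) hedge
      omega
    have hgetrow : PySem.List.pyGet? data row = some data[n] :=
      PySem.List.pyGet?_eq_some_getElem data hr0 hrlen
    obtain ⟨hC, hhC⟩ : ∃ c, PySem.Str.pyGet? data[n] col = some c := by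
      cases e : PySem.Str.pyGet? data[n] col with
      | some c => exact ⟨c, rfl⟩
      | none =>
        exfalso
        simp only [pysem] at e
        exact e (hcol _ (data.getElem_mem (by omega)))
    simp only [hgetrow, hhC]
    -- characterise the blocker list
    set p : Nat → Bool := fun k => decide (hC ≤ (PySem.Str.pyGet? (data.getD k "") col).getD ' ') with hpdef
    have hbl : pvBlockers col hC (PySem.List.enumerate data 0)
        = ((List.range data.length).filter p).map (fun (k : Nat) => (k : Int)) := by
      rw [pvBlockers_eq col hC data 0 hcol]
      apply List.map_congr_left
      intro k _
      simp
    have hpn : p n = true := by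
      have hg : data.getD n "" = data[n] := List.getD_eq_getElem data "" (by omega)
      simp only [hpdef, hg, hhC, Option.getD_some]
      simp
    set F : List Nat := (List.range data.length).filter p with hF
    have hmemF : n ∈ F := by
      rw [hF, List.mem_filter, List.mem_range]
      exact ⟨by omega, hpn⟩
    have hFne : F ≠ [] := fun hnil => by rw [hnil] at hmemF; cases hmemF
    obtain ⟨m, hm⟩ : ∃ m, F.head? = some m := by
      cases e : F.head? with
      | some m => exact ⟨m, rfl⟩
      | none => exact absurd (List.head?_eq_none_iff.mp e) hFne
    obtain ⟨m', hm'⟩ : ∃ m, F.getLast? = some m := by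
      cases e : F.getLast? with
      | some m => exact ⟨m, rfl⟩
      | none => exact absurd (List.getLast?_eq_none_iff.mp e) hFne
    have hget0 : PySem.List.pyGet? (pvBlockers col hC (PySem.List.enumerate data 0)) 0
        = some ((m : Int)) := by
      rw [hbl, PySem.List.pyGet?_zero, ← List.head?_eq_getElem?, List.head?_map, hm]
      rfl
    have hgetneg : PySem.List.pyGet? (pvBlockers col hC (PySem.List.enumerate data 0)) (-1)
        = some ((m' : Int)) := by
      rw [hbl, PySem.List.pyGet?_neg_one, List.getLast?_map, hm']
      rfl
    simp only [hget0, hgetneg]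
    -- rewrite the filtered-range facts through range = range' 0
    have hFr : F = (List.range' 0 data.length).filter p := by
      rw [hF, List.range_eq_range']
    -- head = n  ↔  every index above is below hC
    have hhead : (m = n) ↔ (∀ k, k < n → p k = false) := by
      constructor
      · intro hmn
        rw [hFr, hmn] at hm
        have := (pv_head_filter_range' p n data.length 0).mp hm
        exact fun k hk => this.2.2.2 k (by omega) hk
      · intro hall
        have : F.head? = some n := by
          rw [hFr]
          exact (pv_head_filter_range' p n data.length 0).mpr
            ⟨by omega, by omega, hpn, fun k _ hk => hall k hk⟩
        rw [hm] at this
        exact Option.some_inj.mp this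
    -- last = n  ↔  every index below is below hC
    have hlast : (m' = n) ↔ (∀ k, n < k → k < data.length → p k = false) := by
      constructor
      · intro hmn
        rw [hFr, hmn] at hm'
        have := (pv_last_filter_range' p n data.length 0).mp hm'
        exact fun k hk1 hk2 => this.2.2.2 k hk1 (by omega)
      · intro hall
        have : F.getLast? = some n := by
          rw [hFr]
          exact (pv_last_filter_range' p n data.length 0).mpr
            ⟨by omega, by omega, hpn, fun k hk1 hk2 => hall k hk1 (by omega)⟩
        rw [hm'] at this
        exact Option.some_inj.mp this
    -- A's two loops against the same quantifiers
    have htop : (pvLoopA data col hC (PySem.List.pyRange 0 row 1) = true) ↔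
        (∀ k, k < n → p k = false) := by
      rw [pvLoopA_iff data col hC _ hcol
          (by intro i hi; rw [PySem.List.mem_pyRange_one] at hi; omega)]
      constructor
      · intro H k hk
        have hklen : k < data.length := by omega
        have := H (k : Int) (by rw [PySem.List.mem_pyRange_one]; omega) (by simpa using hklen)
        have hgd : data.getD k "" = data[k] := List.getD_eq_getElem data "" hklen
        simp only [hpdef, hgd]
        simpa [not_le] using this
      · intro H i hi hilt
        rw [PySem.List.mem_pyRange_one] at hi
        have hk : i.toNat < n := by omega
        have := H i.toNat hk
        have hgd : data.getD i.toNat "" = data[i.toNat] := List.getD_eq_getElem data "" (by omega)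
        simp only [hpdef, hgd] at this
        simpa [not_le] using this
    have hbot : (pvLoopA data col hC (PySem.List.pyRange (row + 1) (data.length : Int) 1) = true) ↔
        (∀ k, n < k → k < data.length → p k = false) := by
      rw [pvLoopA_iff data col hC _ hcol
          (by intro i hi; rw [PySem.List.mem_pyRange_one] at hi; omega)]
      constructor
      · intro H k hk1 hk2
        have := H (k : Int) (by rw [PySem.List.mem_pyRange_one]; omega) (by simpa using hk2)
        have hgd : data.getD k "" = data[k] := List.getD_eq_getElem data "" hk2
        simp only [hpdef, hgd]
        simpa [not_le] using this
      · intro H i hi hilt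
        rw [PySem.List.mem_pyRange_one] at hi
        have := H i.toNat (by omega) (by omega)
        have hgd : data.getD i.toNat "" = data[i.toNat] := List.getD_eq_getElem data "" (by omega)
        simp only [hpdef, hgd] at this
        simpa [not_le] using this
    -- cast bridge: (m : Int) = row ↔ m = n
    have hcast : ∀ (x : Nat), ((x : Int) = row) ↔ (x = n) := by
      intro x
      rw [hrow]
      exact Int.natCast_inj
    by_cases h1 : pvLoopA data col hC (PySem.List.pyRange 0 row 1) = true
    · rw [if_pos h1]
      have : m = n := hhead.mpr (htop.mp h1)
      simp [hcast, this]
    · rw [if_neg h1]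
      have hm1 : ¬ (m = n) := fun hcon => h1 (htop.mpr (hhead.mp hcon))
      by_cases h2 : pvLoopA data col hC (PySem.List.pyRange (row + 1) (data.length : Int) 1) = true
      · rw [if_pos h2]
        have : m' = n := hlast.mpr (hbot.mp h2)
        simp [hcast, this]
      · rw [if_neg h2]
        have hm2 : ¬ (m' = n) := fun hcon => h2 (hbot.mpr (hlast.mp hcon))
        simp [hcast, hm1, hm2]
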